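-- pv_equiv track=rewrite | github.com/annkonieczna/ASD | Summer_comeback/Egzaminy/2024_2025/Egz1B/egz1B.py | BFS
-- ===== SOURCE A (Python) =====
-- from collections import deque
-- from collections import deque
--
-- def BFS(G,u,sources):
--     n = len(G)
--     visited = [False]*n
--     q = deque(sources)
--     while q:
--         u = q.popleft()
--         for v in G[u]:
--             if not visited[v]:
--                 visited[v] = True
--                 q.append(v)
--
--
--     return visited
-- ===== SOURCE B (Python) =====
-- def BFS(G, u, sources):
--     n = len(G)
--     visited = [False] * n
--
--     def visit(u):
--         for v in G[u]:
--             if not visited[v]: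
--                 visited[v] = True
--                 visit(v)
--
--     for s in sources:
--         visit(s)
--     return visited
-- ===== Notes on version B (the rewrite author's own statement) =====
-- stated objective: alternative
-- what changed: Replaces the explicit deque-based BFS worklist with a recursive depth-first visit over the graph (sources not pre-marked, exactly as in A); traversal order changes but the marked reachable-via-an-edge set is identical.
-- outside the precondition, e.g. on BFS([[], [5]], 0, [0]): A returns [False, False], B returns [False, False]
import Mathlib
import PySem

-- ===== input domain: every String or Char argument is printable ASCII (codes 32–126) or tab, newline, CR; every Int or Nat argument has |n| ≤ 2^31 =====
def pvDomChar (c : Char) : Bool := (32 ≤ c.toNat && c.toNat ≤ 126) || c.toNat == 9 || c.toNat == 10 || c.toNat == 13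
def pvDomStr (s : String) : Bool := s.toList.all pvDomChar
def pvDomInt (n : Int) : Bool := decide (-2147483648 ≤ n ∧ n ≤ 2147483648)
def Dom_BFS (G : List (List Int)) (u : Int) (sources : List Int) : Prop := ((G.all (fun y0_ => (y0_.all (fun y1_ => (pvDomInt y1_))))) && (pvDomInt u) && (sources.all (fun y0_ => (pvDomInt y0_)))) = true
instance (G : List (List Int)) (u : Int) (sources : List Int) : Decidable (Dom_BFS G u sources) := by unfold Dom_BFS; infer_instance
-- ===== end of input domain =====

-- B replaces A's deque-based BFS worklist by a recursive depth-first visit (same marked set, different traversal);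
-- the proof shows both mark exactly the nodes reachable by at least one edge from a source.
-- NOTE: A mutates nothing observable (fresh visited list); equivalence is about the return value.

-- number of still-unvisited entries; used as the termination measure of both loop ports
def cntF (l : List Bool) : Nat := l.count false

-- if visited[v] is some false then marking it strictly decreases cntF (termination of A's while-loop)
theorem pyGet?_false_set (l : List Bool) (v : Int) (h : PySem.List.pyGet? l v = some false) :
    cntF (PySem.List.pySetD l v true) < cntF l := by
  unfold PySem.List.pyGet? at h
  cases hk : PySem.List.pyIdx? l.length v with
  | none => rw [hk] at h; simp at h
  | some k =>
    rw [hk] at h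
    simp only [Option.bind_some] at h
    have hklt : k < l.length := by
      by_contra hge
      rw [List.getElem?_eq_none (by omega)] at h; simp at h
    have hlv : l[k] = false := by
      rw [List.getElem?_eq_getElem hklt] at h; simpa using h
    have hset : PySem.List.pySetD l v true = l.set k true := by
      unfold PySem.List.pySetD PySem.List.pySet?
      rw [hk]; rfl
    rw [hset]
    have hpos : 0 < l.count false := List.count_pos_iff.mpr (by
      exact List.mem_iff_getElem.mpr ⟨k, hklt, hlv⟩)
    unfold cntF
    rw [List.count_set hklt, hlv]
    simp only [beq_self_eq_true, if_true, beq_iff_eq, Bool.true_eq_false, if_false]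
    omega

-- ===== PORT A =====
-- the body of A's while-loop: 'for v in G[u]: if not visited[v]: visited[v]=True; q.append(v)'
def bfsInner (visited : List Bool) (q : List Int) (row : List Int) : List Bool × List Int :=
  match row with
  | [] => (visited, q)
  | v :: rest =>
    match PySem.List.pyGet? visited v with
    | some false => bfsInner (PySem.List.pySetD visited v true) (q ++ [v]) rest
    | _ => bfsInner visited q rest

theorem bfsInner_measure (row : List Int) (visited : List Bool) (q : List Int) :
    2 * cntF (bfsInner visited q row).1 + (bfsInner visited q row).2.length ≤
      2 * cntF visited + q.length := by
  induction row generalizing visited q with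
  | nil => simp [bfsInner]
  | cons v rest ih =>
    unfold bfsInner
    cases h : PySem.List.pyGet? visited v with
    | none => exact ih visited q
    | some b =>
      cases b with
      | false =>
        have := pyGet?_false_set visited v h
        have := ih (PySem.List.pySetD visited v true) (q ++ [v])
        simp only [List.length_append, List.length_cons, List.length_nil] at this ⊢
        omega
      | true => exact ih visited q

-- A's while-loop over the deque
def bfsLoop (G : List (List Int)) (visited : List Bool) (q : List Int) : List Bool :=
  match q with
  | [] => visited
  | u :: rest =>
    match PySem.List.pyGet? G u with
    | none => visited  -- Python raises IndexError here; excluded by Pre_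
    | some row =>
      let p := bfsInner visited rest row
      bfsLoop G p.1 p.2
termination_by 2 * cntF visited + q.length
decreasing_by
  have := bfsInner_measure row visited rest
  simp only [List.length_cons]
  omega

def BFS (G : List (List Int)) (u : Int) (sources : List Int) : List Bool :=
  bfsLoop G (List.replicate G.length false) sources

-- ===== PORT B =====
-- recursive DFS: 'def visit(u): for v in G[u]: if not visited[v]: visited[v]=True; visit(v)'
-- (fuel is only a totality guard: every mark strictly decreases cntF, so cntF visited < fuel never runs out)
mutual
def dfsGo (G : List (List Int)) (fuel : Nat) (visited : List Bool) (row : List Int) : List Bool :=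
  match row with
  | [] => visited
  | v :: rest =>
    match PySem.List.pyGet? visited v with
    | some false => dfsGo G fuel (dfsVisit G fuel (PySem.List.pySetD visited v true) v) rest
    | _ => dfsGo G fuel visited rest
termination_by (fuel, 1, row.length)

def dfsVisit (G : List (List Int)) (fuel : Nat) (visited : List Bool) (u : Int) : List Bool :=
  match fuel with
  | 0 => visited  -- never reached when cntF visited < fuel
  | f + 1 =>
    match PySem.List.pyGet? G u with
    | none => visited  -- Python raises IndexError here; excluded by Pre_
    | some row => dfsGo G f visited row
termination_by (fuel, 0, 0)
end


def BFS_alt (G : List (List Int)) (u : Int) (sources : List Int) : List Bool :=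
  sources.foldl (fun vis s => dfsVisit G (G.length + 1) vis s) (List.replicate G.length false)

-- ===== PRECONDITION & SPEC =====
-- Pre_ excludes inputs on which A raises IndexError: a source or an adjacency entry outside [-len(G), len(G)).
-- (When sources is nonempty it requires this of EVERY entry of G, also in rows the search never dequeues, where
-- A would still return: a closed-form condition cannot follow reachability; on every such excluded input both
-- programs return the identical value.)
def Pre_BFS (G : List (List Int)) (u : Int) (sources : List Int) : Prop :=
  sources = [] ∨
  ((∀ s ∈ sources, PySem.Raise.InRange G.length s) ∧
   (∀ row ∈ G, ∀ v ∈ row, PySem.Raise.InRange G.length v))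
instance (G : List (List Int)) (u : Int) (sources : List Int) : Decidable (Pre_BFS G u sources) := by
  unfold Pre_BFS PySem.Raise.InRange; infer_instance

def pvWitness_BFS : List (List Int) × Int × List Int := ([[1], [0], [-1]], 0, [0, 2])

def Spec_BFS (G : List (List Int)) (u : Int) (sources : List Int) (out : List Bool) : Prop := out = BFS_alt G u sources
instance (G : List (List Int)) (u : Int) (sources : List Int) (out : List Bool) : Decidable (Spec_BFS G u sources out) := by unfold Spec_BFS; infer_instance

-- ===== CLAIM (what is proved, stated in full; the proofs are below) =====
def Claim_equal_BFS : Prop := ∀ (G : List (List Int)) (u : Int) (sources : List Int), Dom_BFS G u sources → Pre_BFS G u sources → Spec_BFS G u sources (BFS G u sources)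

-- ===== LEMMAS AND PROOFS =====

-- resolved (Python) index: the Nat position that index i denotes in a list of length n
def ridx (n : Nat) (i : Int) : Nat := if 0 ≤ i then i.toNat else n - (-i).toNat

-- visited[j] read as a plain Nat-indexed lookup (false beyond the end)
def mget (l : List Bool) (j : Nat) : Bool := l.getD j false

-- edge in G from resolved node j to resolved node k
def Edge (G : List (List Int)) (j k : Nat) : Prop :=
  ∃ row, G[j]? = some row ∧ ∃ v ∈ row, PySem.Raise.InRange G.length v ∧ ridx G.length v = k

-- the set both programs mark: nodes reachable from a source by at least one edge
inductive Reach (G : List (List Int)) (src : List Int) : Nat → Prop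
  | base {s j} : s ∈ src → PySem.Raise.InRange G.length s → Edge G (ridx G.length s) j → Reach G src j
  | step {u j} : Reach G src u → Edge G u j → Reach G src j

def closedAt (G : List (List Int)) (visited : List Bool) (j : Nat) : Prop :=
  ∀ k, Edge G j k → mget visited k = true

theorem ridx_lt {n : Nat} {i : Int} (h : PySem.Raise.InRange n i) : ridx n i < n := by
  obtain ⟨h1, h2⟩ := h
  unfold ridx
  split
  · omega
  · omega

theorem pyIdx?_eq {n : Nat} {i : Int} (h : PySem.Raise.InRange n i) :
    PySem.List.pyIdx? n i = some (ridx n i) := by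
  obtain ⟨h1, h2⟩ := h
  unfold PySem.List.pyIdx? ridx
  split
  · simp [*]
  · simp [*]

theorem pyGet?_eq {α : Type} {l : List α} {n : Nat} {i : Int} (hl : l.length = n)
    (h : PySem.Raise.InRange n i) : PySem.List.pyGet? l i = l[ridx n i]? := by
  subst hl
  unfold PySem.List.pyGet?
  rw [pyIdx?_eq h]
  rfl

theorem pyGet?_eq_mget {l : List Bool} {n : Nat} {i : Int} (hl : l.length = n)
    (h : PySem.Raise.InRange n i) : PySem.List.pyGet? l i = some (mget l (ridx n i)) := by
  rw [pyGet?_eq hl h]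
  have : ridx n i < l.length := by rw [hl]; exact ridx_lt h
  rw [List.getElem?_eq_getElem this]
  unfold mget
  rw [List.getD_eq_getElem _ _ this]

theorem pySetD_eq {l : List Bool} {n : Nat} {i : Int} (v : Bool) (hl : l.length = n)
    (h : PySem.Raise.InRange n i) : PySem.List.pySetD l i v = l.set (ridx n i) v := by
  subst hl
  unfold PySem.List.pySetD PySem.List.pySet?
  rw [pyIdx?_eq h]
  rfl

theorem mget_set_self {l : List Bool} {j : Nat} (h : j < l.length) :
    mget (l.set j true) j = true := by
  unfold mget
  rw [List.getD_eq_getElem?_getD, List.getElem?_set]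
  simp [h]

theorem mget_set {l : List Bool} {j k : Nat} (b : Bool) :
    mget (l.set j b) k = if j = k ∧ j < l.length then b else mget l k := by
  unfold mget
  rw [List.getD_eq_getElem?_getD, List.getD_eq_getElem?_getD, List.getElem?_set]
  by_cases hjk : j = k
  · subst hjk
    by_cases hj : j < l.length
    · simp [hj]
    · rw [List.getElem?_eq_none (l := l) (by omega)]
      simp [hj]
  · simp [hjk]

theorem mget_mono_set {l : List Bool} {j k : Nat} (h : mget l k = true) :
    mget (l.set j true) k = true := by
  rw [mget_set]
  split <;> simp [h]

theorem cntF_set_lt {l : List Bool} {j : Nat} (h : j < l.length) (hf : mget l j = false) :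
    cntF (l.set j true) < cntF l := by
  unfold cntF
  rw [List.count_set h]
  have hlj : l[j] = false := by
    unfold mget at hf
    rwa [List.getD_eq_getElem _ _ h] at hf
  have hpos : 0 < l.count false :=
    List.count_pos_iff.mpr (List.mem_iff_getElem.mpr ⟨j, h, hlj⟩)
  rw [hlj]
  simp only [beq_self_eq_true, if_true, beq_iff_eq, Bool.true_eq_false, if_false]
  omega

theorem cntF_zero_mget {l : List Bool} (h : cntF l = 0) (j : Nat) (hj : j < l.length) :
    mget l j = true := by
  unfold cntF at h
  unfold mget
  rw [List.getD_eq_getElem _ _ hj]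
  have := List.count_eq_zero.mp h
  cases hlj : l[j] with
  | false => exact absurd (hlj ▸ List.getElem_mem hj) this
  | true => rfl

theorem closedAt_mono {G : List (List Int)} {v w : List Bool} {j : Nat}
    (hm : ∀ k, mget v k = true → mget w k = true) (h : closedAt G v j) : closedAt G w j :=
  fun k hk => hm k (h k hk)

-- ========== A-side: the BFS loop marks exactly Reach ==========

-- the inner for-loop: monotone marking, new marks come from (and are appended for) row members
theorem bfsInner_spec {n : Nat} (G : List (List Int)) (src : List Int)
    (row : List Int) (visited : List Bool) (q : List Int)
    (hl : visited.length = n)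
    (hrow : ∀ v ∈ row, PySem.Raise.InRange n v) :
    (bfsInner visited q row).1.length = n ∧
    (∀ j, mget visited j = true → mget (bfsInner visited q row).1 j = true) ∧
    (∀ j, mget (bfsInner visited q row).1 j = true →
        mget visited j = true ∨ ∃ x ∈ (bfsInner visited q row).2, x ∈ row ∧ ridx n x = j) ∧
    (∀ v ∈ row, mget (bfsInner visited q row).1 (ridx n v) = true) ∧
    (∀ x ∈ (bfsInner visited q row).2, x ∈ q ∨ x ∈ row) ∧
    (∀ x ∈ q, x ∈ (bfsInner visited q row).2) := by
  induction row generalizing visited q with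
  | nil =>
    simp only [bfsInner]
    refine ⟨hl, fun j h => h, fun j h => Or.inl h, by simp, fun x hx => Or.inl hx, fun x hx => hx⟩
  | cons v rest ih =>
    have hv : PySem.Raise.InRange n v := hrow v (List.mem_cons_self)
    have hvl : ridx n v < visited.length := by rw [hl]; exact ridx_lt hv
    have hrest : ∀ w ∈ rest, PySem.Raise.InRange n w := fun w hw => hrow w (List.mem_cons_of_mem _ hw)
    unfold bfsInner
    rw [pyGet?_eq_mget hl hv]
    cases hmv : mget visited (ridx n v) with
    | false =>
      simp only
      rw [pySetD_eq true hl hv]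
      have hl1 : (visited.set (ridx n v) true).length = n := by simp [hl]
      obtain ⟨P1, P2, P3, P4, P5, P6⟩ := ih (visited.set (ridx n v) true) (q ++ [v]) hl1 hrest
      refine ⟨P1, ?_, ?_, ?_, ?_, ?_⟩
      · intro j hj; exact P2 j (mget_mono_set hj)
      · intro j hj
        rcases P3 j hj with hold | ⟨x, hx, hxr, hxj⟩
        · rw [mget_set] at hold
          by_cases hc : ridx n v = j ∧ ridx n v < visited.length
          · right
            exact ⟨v, P6 v (by simp), List.mem_cons_self, hc.1⟩
          · left; rwa [if_neg hc] at hold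
        · right; exact ⟨x, hx, List.mem_cons_of_mem _ hxr, hxj⟩
      · intro w hw
        rcases List.mem_cons.mp hw with rfl | hw'
        · exact P2 _ (mget_set_self hvl)
        · exact P4 w hw'
      · intro x hx
        rcases P5 x hx with hq | hr
        · rcases List.mem_append.mp hq with h1 | h2
          · exact Or.inl h1
          · simp at h2; subst h2; exact Or.inr List.mem_cons_self
        · exact Or.inr (List.mem_cons_of_mem _ hr)
      · intro x hx; exact P6 x (List.mem_append_left _ hx)
    | true =>
      simp only
      obtain ⟨P1, P2, P3, P4, P5, P6⟩ := ih visited q hl hrest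
      refine ⟨P1, P2, ?_, ?_, ?_, P6⟩
      · intro j hj
        rcases P3 j hj with h1 | ⟨x, hx, hxr, hxj⟩
        · exact Or.inl h1
        · exact Or.inr ⟨x, hx, List.mem_cons_of_mem _ hxr, hxj⟩
      · intro w hw
        rcases List.mem_cons.mp hw with rfl | hw'
        · exact P2 _ hmv
        · exact P4 w hw'
      · intro x hx
        rcases P5 x hx with h1 | h2
        · exact Or.inl h1
        · exact Or.inr (List.mem_cons_of_mem _ h2)

-- the loop invariant of A's while-loop, and the final characterisation
theorem bfsLoop_spec (G : List (List Int)) (src : List Int)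
    (hsrc : ∀ s ∈ src, PySem.Raise.InRange G.length s)
    (hG : ∀ row ∈ G, ∀ v ∈ row, PySem.Raise.InRange G.length v) :
    ∀ (visited : List Bool) (q : List Int),
    visited.length = G.length →
    (∀ x ∈ q, PySem.Raise.InRange G.length x) →
    (∀ x ∈ q, x ∈ src ∨ Reach G src (ridx G.length x)) →
    (∀ j, mget visited j = true → Reach G src j) →
    (∀ s ∈ src, s ∈ q ∨ closedAt G visited (ridx G.length s)) →
    (∀ j, mget visited j = true → (∃ x ∈ q, ridx G.length x = j) ∨ closedAt G visited j) →
    (bfsLoop G visited q).length = G.length ∧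
    (∀ j, mget (bfsLoop G visited q) j = true ↔ Reach G src j) := by
  intro visited q
  induction visited, q using bfsLoop.induct (G := G) with
  | case1 visited =>
    intro hl _ _ inv4 inv5 inv6
    rw [show bfsLoop G visited [] = visited from by rw [bfsLoop]]
    have hcs : ∀ s ∈ src, closedAt G visited (ridx G.length s) := by
      intro s hs
      rcases inv5 s hs with h | h
      · exact absurd h (List.not_mem_nil)
      · exact h
    have hcm : ∀ j, mget visited j = true → closedAt G visited j := by
      intro j hj
      rcases inv6 j hj with ⟨x, hx, -⟩ | h
      · exact absurd hx (List.not_mem_nil)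
      · exact h
    refine ⟨hl, fun j => ⟨inv4 j, ?_⟩⟩
    intro hr
    induction hr with
    | base hs hsIn hedge => exact hcs _ hs _ hedge
    | step hu hedge ih => exact hcm _ ih _ hedge
  | case2 visited u rest hnone =>
    intro hl inv2 _ _ _ _
    exact absurd (pyGet?_eq rfl (inv2 u List.mem_cons_self) ▸ hnone)
      (by simp [List.getElem?_eq_getElem (ridx_lt (inv2 u List.mem_cons_self))])
  | case3 visited u rest row hrowu p ih =>
    intro hl inv2 inv3 inv4 inv5 inv6
    rw [show bfsLoop G visited (u :: rest) = bfsLoop G (bfsInner visited rest row).1 (bfsInner visited rest row).2 from by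
      rw [bfsLoop]; rw [hrowu]]
    have hu : PySem.Raise.InRange G.length u := inv2 u List.mem_cons_self
    have hGu : G[ridx G.length u]? = some row := by
      rw [← pyGet?_eq rfl hu]; exact hrowu
    have hrowG : row ∈ G := List.mem_of_getElem? hGu
    have hrow : ∀ v ∈ row, PySem.Raise.InRange G.length v := hG row hrowG
    have hEdge : ∀ v ∈ row, Edge G (ridx G.length u) (ridx G.length v) :=
      fun v hv => ⟨row, hGu, v, hv, hrow v hv, rfl⟩
    have hReachRow : ∀ v ∈ row, Reach G src (ridx G.length v) := by
      intro v hv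
      rcases inv3 u List.mem_cons_self with h | h
      · exact Reach.base h hu (hEdge v hv)
      · exact Reach.step h (hEdge v hv)
    obtain ⟨P1, P2, P3, P4, P5, P6⟩ := bfsInner_spec G src row visited rest hl hrow
    have hclosedu : closedAt G (bfsInner visited rest row).1 (ridx G.length u) := by
      intro k hk
      obtain ⟨row', hrow', v, hv, hvIn, hvk⟩ := hk
      rw [hGu] at hrow'
      cases hrow'
      exact hvk ▸ P4 v hv
    refine ih P1 ?_ ?_ ?_ ?_ ?_
    · intro x hx
      rcases P5 x hx with h | h
      · exact inv2 x (List.mem_cons_of_mem _ h)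
      · exact hrow x h
    · intro x hx
      rcases P5 x hx with h | h
      · exact inv3 x (List.mem_cons_of_mem _ h)
      · exact Or.inr (hReachRow x h)
    · intro j hj
      rcases P3 j hj with h | ⟨x, hx, hxr, hxj⟩
      · exact inv4 j h
      · exact hxj ▸ hReachRow x hxr
    · intro s hs
      rcases inv5 s hs with h | h
      · rcases List.mem_cons.mp h with rfl | h'
        · exact Or.inr hclosedu
        · exact Or.inl (P6 s h')
      · exact Or.inr (closedAt_mono P2 h)
    · intro j hj
      rcases P3 j hj with h | ⟨x, hx, hxr, hxj⟩
      · rcases inv6 j h with ⟨x, hx, hxj⟩ | hc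
        · rcases List.mem_cons.mp hx with rfl | h'
          · exact Or.inr (hxj ▸ hclosedu)
          · exact Or.inl ⟨x, P6 x h', hxj⟩
        · exact Or.inr (closedAt_mono P2 hc)
      · exact Or.inl ⟨x, hx, hxj⟩

-- ========== B-side: the DFS marks exactly Reach ==========

-- simultaneous invariants of dfsVisit / dfsGo
theorem dfs_spec (G : List (List Int)) (src : List Int)
    (hG : ∀ row ∈ G, ∀ v ∈ row, PySem.Raise.InRange G.length v) :
    ∀ fuel : Nat,
    ((∀ (visited : List Bool) (u : Int) (X : Nat → Prop),
      visited.length = G.length → cntF visited < fuel →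
      PySem.Raise.InRange G.length u →
      (u ∈ src ∨ Reach G src (ridx G.length u)) →
      (∀ j, mget visited j = true → (X j ∨ j = ridx G.length u) ∨ closedAt G visited j) →
      (dfsVisit G fuel visited u).length = G.length ∧
      (∀ j, mget visited j = true → mget (dfsVisit G fuel visited u) j = true) ∧
      (∀ j, mget (dfsVisit G fuel visited u) j = true → mget visited j = true ∨ Reach G src j) ∧
      cntF (dfsVisit G fuel visited u) ≤ cntF visited ∧
      (∀ j, mget (dfsVisit G fuel visited u) j = true → X j ∨ closedAt G (dfsVisit G fuel visited u) j) ∧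
      (∀ row, PySem.List.pyGet? G u = some row → ∀ v ∈ row, mget (dfsVisit G fuel visited u) (ridx G.length v) = true)) ∧
     (∀ (visited : List Bool) (row : List Int) (X : Nat → Prop),
      visited.length = G.length → cntF visited ≤ fuel →
      (∀ v ∈ row, PySem.Raise.InRange G.length v) →
      (∀ v ∈ row, Reach G src (ridx G.length v)) →
      (∀ j, mget visited j = true → X j ∨ closedAt G visited j) →
      (dfsGo G fuel visited row).length = G.length ∧
      (∀ j, mget visited j = true → mget (dfsGo G fuel visited row) j = true) ∧
      (∀ j, mget (dfsGo G fuel visited row) j = true → mget visited j = true ∨ Reach G src j) ∧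
      cntF (dfsGo G fuel visited row) ≤ cntF visited ∧
      (∀ j, mget (dfsGo G fuel visited row) j = true → X j ∨ closedAt G (dfsGo G fuel visited row) j) ∧
      (∀ v ∈ row, mget (dfsGo G fuel visited row) (ridx G.length v) = true))) := by
  intro fuel
  induction fuel with
  | zero =>
    constructor
    · intro visited u X hl hfuel hu hsrc hclosed
      exact absurd hfuel (Nat.not_lt_zero _)
    · intro visited row X hl hfuel hrow hReach hclosed
      have h0 : cntF visited = 0 := Nat.le_zero.mp hfuel
      clear hfuel
      revert hrow hReach
      induction row with
      | nil =>
        intro _ _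
        rw [show dfsGo G 0 visited [] = visited from by rw [dfsGo]]
        exact ⟨hl, fun j h => h, fun j h => Or.inl h, le_rfl, hclosed, by simp⟩
      | cons v rest ih =>
        intro hrow hReach
        have hv := hrow v List.mem_cons_self
        have hmv : mget visited (ridx G.length v) = true :=
          cntF_zero_mget h0 _ (by rw [hl]; exact ridx_lt hv)
        have hstep : dfsGo G 0 visited (v :: rest) = dfsGo G 0 visited rest := by
          rw [dfsGo, pyGet?_eq_mget hl hv, hmv]
        rw [hstep]
        obtain ⟨R1, R2, R3, R4, R5, R6⟩ :=
          ih (fun w hw => hrow w (List.mem_cons_of_mem _ hw))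
             (fun w hw => hReach w (List.mem_cons_of_mem _ hw))
        refine ⟨R1, R2, R3, R4, R5, ?_⟩
        intro w hw
        rcases List.mem_cons.mp hw with rfl | hw'
        · exact R2 _ hmv
        · exact R6 w hw'
  | succ f ihf =>
    obtain ⟨ihV, ihG0⟩ := ihf
    have visitP : ∀ (visited : List Bool) (u : Int) (X : Nat → Prop),
      visited.length = G.length → cntF visited < f + 1 →
      PySem.Raise.InRange G.length u →
      (u ∈ src ∨ Reach G src (ridx G.length u)) →
      (∀ j, mget visited j = true → (X j ∨ j = ridx G.length u) ∨ closedAt G visited j) →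
      (dfsVisit G (f + 1) visited u).length = G.length ∧
      (∀ j, mget visited j = true → mget (dfsVisit G (f + 1) visited u) j = true) ∧
      (∀ j, mget (dfsVisit G (f + 1) visited u) j = true → mget visited j = true ∨ Reach G src j) ∧
      cntF (dfsVisit G (f + 1) visited u) ≤ cntF visited ∧
      (∀ j, mget (dfsVisit G (f + 1) visited u) j = true → X j ∨ closedAt G (dfsVisit G (f + 1) visited u) j) ∧
      (∀ row, PySem.List.pyGet? G u = some row → ∀ v ∈ row, mget (dfsVisit G (f + 1) visited u) (ridx G.length v) = true) := by
      intro visited u X hl hfuel hu hsrc hclosed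
      have hru : ridx G.length u < G.length := ridx_lt hu
      have hGu : PySem.List.pyGet? G u = some (G[ridx G.length u]'hru) := by
        rw [pyGet?_eq rfl hu, List.getElem?_eq_getElem hru]
      set row := G[ridx G.length u]'hru with hrowdef
      have hstep : dfsVisit G (f + 1) visited u = dfsGo G f visited row := by
        rw [dfsVisit, hGu]
      have hGu' : G[ridx G.length u]? = some row := List.getElem?_eq_getElem hru
      have hrowG : row ∈ G := List.getElem_mem _
      have hrow : ∀ v ∈ row, PySem.Raise.InRange G.length v := hG row hrowG
      have hEdge : ∀ v ∈ row, Edge G (ridx G.length u) (ridx G.length v) :=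
        fun v hv => ⟨row, hGu', v, hv, hrow v hv, rfl⟩
      have hReachRow : ∀ v ∈ row, Reach G src (ridx G.length v) := by
        intro v hv
        rcases hsrc with h | h
        · exact Reach.base h hu (hEdge v hv)
        · exact Reach.step h (hEdge v hv)
      obtain ⟨Q1, Q2, Q3, Q4, Q5, Q6⟩ :=
        ihG0 visited row (fun j => X j ∨ j = ridx G.length u) hl (Nat.lt_succ_iff.mp hfuel)
          hrow hReachRow hclosed
      rw [hstep]
      refine ⟨Q1, Q2, Q3, Q4, ?_, ?_⟩
      · intro j hj
        rcases Q5 j hj with (h | rfl) | h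
        · exact Or.inl h
        · refine Or.inr ?_
          intro k hk
          obtain ⟨row', hrow', w, hw, hwIn, hwk⟩ := hk
          rw [hGu'] at hrow'
          cases hrow'
          exact hwk ▸ Q6 w hw
        · exact Or.inr h
      · intro row0 hrow0 v hv
        rw [hGu] at hrow0
        cases hrow0
        exact Q6 v hv
    refine ⟨visitP, ?_⟩
    intro visited row X hl hfuel hrow hReach hclosed
    revert visited
    revert hrow hReach
    induction row with
    | nil =>
      intro _ _ visited hl hfuel hclosed
      rw [show dfsGo G (f + 1) visited [] = visited from by rw [dfsGo]]
      exact ⟨hl, fun j h => h, fun j h => Or.inl h, le_rfl, hclosed, by simp⟩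
    | cons v rest ih =>
      intro hrow0 hReach0 visited hl hfuel hclosed
      have hv := hrow0 v List.mem_cons_self
      have hvl : ridx G.length v < visited.length := by rw [hl]; exact ridx_lt hv
      cases hmv : mget visited (ridx G.length v) with
      | true =>
        have hstep : dfsGo G (f + 1) visited (v :: rest) = dfsGo G (f + 1) visited rest := by
          rw [dfsGo, pyGet?_eq_mget hl hv, hmv]
        rw [hstep]
        obtain ⟨R1, R2, R3, R4, R5, R6⟩ :=
          ih (fun w hw => hrow0 w (List.mem_cons_of_mem _ hw))
             (fun w hw => hReach0 w (List.mem_cons_of_mem _ hw)) visited hl hfuel hclosed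
        refine ⟨R1, R2, R3, R4, R5, ?_⟩
        intro w hw
        rcases List.mem_cons.mp hw with rfl | hw'
        · exact R2 _ hmv
        · exact R6 w hw'
      | false =>
        have hstep : dfsGo G (f + 1) visited (v :: rest) =
            dfsGo G (f + 1) (dfsVisit G (f + 1) (visited.set (ridx G.length v) true) v) rest := by
          rw [dfsGo, pyGet?_eq_mget hl hv, hmv, pySetD_eq true hl hv]
        rw [hstep]
        set vis1 := visited.set (ridx G.length v) true with hvis1
        have hl1 : vis1.length = G.length := by rw [hvis1, List.length_set, hl]
        have hc1 : cntF vis1 < cntF visited := cntF_set_lt hvl hmv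
        obtain ⟨D1, D2, D3, D4, D5, D6⟩ :=
          visitP vis1 v X hl1 (by omega) hv (Or.inr (hReach0 v List.mem_cons_self)) (by
            intro j hj
            rw [hvis1, mget_set] at hj
            by_cases hc : ridx G.length v = j ∧ ridx G.length v < visited.length
            · exact Or.inl (Or.inr hc.1.symm)
            · rw [if_neg hc] at hj
              rcases hclosed j hj with h | h
              · exact Or.inl (Or.inl h)
              · exact Or.inr (closedAt_mono (fun k => mget_mono_set) h))
        set vis2 := dfsVisit G (f + 1) vis1 v with hvis2
        obtain ⟨R1, R2, R3, R4, R5, R6⟩ :=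
          ih (fun w hw => hrow0 w (List.mem_cons_of_mem _ hw))
             (fun w hw => hReach0 w (List.mem_cons_of_mem _ hw)) vis2 D1 (by omega) D5
        refine ⟨R1, ?_, ?_, ?_, R5, ?_⟩
        · intro j hj
          exact R2 j (D2 j (mget_mono_set hj))
        · intro j hj
          rcases R3 j hj with h2 | h2
          · rcases D3 j h2 with h3 | h3
            · rw [hvis1, mget_set] at h3
              by_cases hc : ridx G.length v = j ∧ ridx G.length v < visited.length
              · exact Or.inr (hc.1 ▸ hReach0 v List.mem_cons_self)
              · rw [if_neg hc] at h3
                exact Or.inl h3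
            · exact Or.inr h3
          · exact Or.inr h2
        · omega
        · intro w hw
          rcases List.mem_cons.mp hw with rfl | hw'
          · exact R2 _ (D2 _ (mget_set_self hvl))
          · exact R6 w hw'

theorem mget_replicate (n j : Nat) : mget (List.replicate n false) j = false := by
  unfold mget
  rw [List.getD_eq_getElem?_getD, List.getElem?_replicate]
  split <;> rfl

theorem mget_eq_getElem {l : List Bool} {i : Nat} (h : i < l.length) : mget l i = l[i] := by
  unfold mget
  exact List.getD_eq_getElem _ _ h

-- B's top-level for-loop over the sources
theorem dfsFold_spec (G : List (List Int)) (src : List Int)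
    (hsrc : ∀ s ∈ src, PySem.Raise.InRange G.length s)
    (hG : ∀ row ∈ G, ∀ v ∈ row, PySem.Raise.InRange G.length v) :
    ∀ (srcs : List Int) (visited : List Bool),
    (∀ s ∈ srcs, s ∈ src) →
    visited.length = G.length →
    (∀ j, mget visited j = true → Reach G src j) →
    (∀ j, mget visited j = true → closedAt G visited j) →
    (srcs.foldl (fun vis s => dfsVisit G (G.length + 1) vis s) visited).length = G.length ∧
    (∀ j, mget (srcs.foldl (fun vis s => dfsVisit G (G.length + 1) vis s) visited) j = true →
        Reach G src j) ∧
    (∀ j, mget (srcs.foldl (fun vis s => dfsVisit G (G.length + 1) vis s) visited) j = true →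
        closedAt G (srcs.foldl (fun vis s => dfsVisit G (G.length + 1) vis s) visited) j) ∧
    (∀ j, mget visited j = true →
        mget (srcs.foldl (fun vis s => dfsVisit G (G.length + 1) vis s) visited) j = true) ∧
    (∀ s ∈ srcs, closedAt G (srcs.foldl (fun vis s => dfsVisit G (G.length + 1) vis s) visited)
        (ridx G.length s)) := by
  intro srcs
  induction srcs with
  | nil =>
    intro visited _ hl hsound hcl
    exact ⟨hl, hsound, hcl, fun j h => h, by simp⟩
  | cons s ss ih =>
    intro visited hsub hl hsound hcl
    rw [List.foldl_cons]
    have hs : PySem.Raise.InRange G.length s := hsrc s (hsub s List.mem_cons_self)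
    obtain ⟨D1, D2, D3, D4, D5, D6⟩ :=
      (dfs_spec G src hG (G.length + 1)).1 visited s (fun _ => False) hl
        (by have := List.count_le_length (l := visited) (a := false); unfold cntF; omega)
        hs (Or.inl (hsub s List.mem_cons_self))
        (fun j hj => Or.inr (hcl j hj))
    set vis' := dfsVisit G (G.length + 1) visited s with hvis'
    have hsound' : ∀ j, mget vis' j = true → Reach G src j := by
      intro j hj
      rcases D3 j hj with h | h
      · exact hsound j h
      · exact h
    have hcl' : ∀ j, mget vis' j = true → closedAt G vis' j := by
      intro j hj
      rcases D5 j hj with h | h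
      · exact absurd h not_false
      · exact h
    have hclS : closedAt G vis' (ridx G.length s) := by
      intro k hk
      obtain ⟨row, hrow, w, hw, hwIn, hwk⟩ := hk
      have hGs : PySem.List.pyGet? G s = some row := by
        rw [pyGet?_eq rfl hs]; exact hrow
      exact hwk ▸ D6 row hGs w hw
    obtain ⟨R1, R2, R3, Rm, R4⟩ :=
      ih vis' (fun x hx => hsub x (List.mem_cons_of_mem _ hx)) D1 hsound' hcl'
    refine ⟨R1, R2, R3, fun j hj => Rm j (D2 j hj), ?_⟩
    intro x hx
    rcases List.mem_cons.mp hx with rfl | hx'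
    · exact closedAt_mono Rm hclS
    · exact R4 x hx'

-- ===== VERDICT (by name: the statement is the Claim_ definition above) =====
theorem BFS_spec : Claim_equal_BFS := by
  intro G u src _ hpre
  rcases hpre with rfl | ⟨hsrc, hG⟩
  · show BFS G u [] = BFS_alt G u []
    unfold BFS BFS_alt
    rw [show bfsLoop G (List.replicate G.length false) [] = List.replicate G.length false from by
      rw [bfsLoop]]
    rfl
  unfold Spec_BFS BFS BFS_alt
  have hlinit : (List.replicate G.length false).length = G.length := List.length_replicate
  have hvac : ∀ j, mget (List.replicate G.length false) j = true → False := by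
    intro j h; rw [mget_replicate] at h; cases h
  obtain ⟨LA, iffA⟩ :=
    bfsLoop_spec G src hsrc hG (List.replicate G.length false) src hlinit hsrc
      (fun x hx => Or.inl hx) (fun j h => absurd (hvac j h) not_false.elim)
      (fun s hs => Or.inl hs) (fun j h => absurd (hvac j h) not_false.elim)
  obtain ⟨R1, R2, R3, -, R4⟩ :=
    dfsFold_spec G src hsrc hG src (List.replicate G.length false) (fun s hs => hs) hlinit
      (fun j h => absurd (hvac j h) not_false.elim) (fun j h => absurd (hvac j h) not_false.elim)
  have iffB : ∀ j, mget (src.foldl (fun vis s => dfsVisit G (G.length + 1) vis s)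
      (List.replicate G.length false)) j = true ↔ Reach G src j := by
    intro j
    refine ⟨R2 j, ?_⟩
    intro hr
    induction hr with
    | base hs hsIn hedge => exact R4 _ hs _ hedge
    | step hu hedge ihr => exact R3 _ ihr _ hedge
  apply List.ext_getElem (LA.trans R1.symm)
  intro i h1 h2
  have hiff := (iffA i).trans (iffB i).symm
  rw [← mget_eq_getElem h1, ← mget_eq_getElem h2]
  cases hA : mget (bfsLoop G (List.replicate G.length false) src) i with
  | true => exact (hiff.mp hA).symm
  | false =>
    cases hB : mget (src.foldl (fun vis s => dfsVisit G (G.length + 1) vis s)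
        (List.replicate G.length false)) i with
    | true => exact absurd (hiff.mpr hB) (by rw [hA]; simp)
    | false => rfl
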